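-- pv_equiv track=rewrite | github.com/ACComputing/acholdingsmbhdr0 | ##########smb1.10.py | _gr
-- ===== SOURCE A (Python) =====
-- AIR=0; GROUND=1; BRICK=2; QBLOCK=3; USED=4
--
-- AIR=0; GROUND=1; BRICK=2; QBLOCK=3; USED=4
--
-- def _gr(W, H, gaps=None):
--     """Base ground grid with optional gaps."""
--     g = [[AIR]*W for _ in range(H)]
--     for x in range(W): g[H-1][x]=GROUND; g[H-2][x]=GROUND
--     if gaps:
--         for gx,gw in gaps:
--             for dx in range(gw):
--                 cx=gx+dx
--                 if 0<=cx<W: g[H-1][cx]=AIR; g[H-2][cx]=AIR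
--     return g
-- ===== SOURCE B (Python) =====
-- AIR=0; GROUND=1; BRICK=2; QBLOCK=3; USED=4
--
-- def _gr(W, H, gaps=None):
--     """Base ground grid: build the ground row once by interval containment, then assemble rows."""
--     def hole(x):
--         return any(gx <= x < gx + gw for gx, gw in (gaps or []))
--     ground = [AIR if hole(x) else GROUND for x in range(W)]
--     if H <= 0:
--         return []
--     if H == 1:
--         return [ground]
--     return [[AIR] * W for _ in range(H - 2)] + [ground, list(ground)]
-- ===== Notes on version B (the rewrite author's own statement) =====
-- stated objective: alternative
-- what changed: Replaces A's mutate-in-place fill-then-carve over a preallocated grid with direct construction: the ground row is computed once per column by an interval-containment test over the gaps (no per-dx carving loop), and the grid is assembled as (H-2) air rows concatenated with two copies of that row (one row when H==1).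
import Mathlib
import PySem

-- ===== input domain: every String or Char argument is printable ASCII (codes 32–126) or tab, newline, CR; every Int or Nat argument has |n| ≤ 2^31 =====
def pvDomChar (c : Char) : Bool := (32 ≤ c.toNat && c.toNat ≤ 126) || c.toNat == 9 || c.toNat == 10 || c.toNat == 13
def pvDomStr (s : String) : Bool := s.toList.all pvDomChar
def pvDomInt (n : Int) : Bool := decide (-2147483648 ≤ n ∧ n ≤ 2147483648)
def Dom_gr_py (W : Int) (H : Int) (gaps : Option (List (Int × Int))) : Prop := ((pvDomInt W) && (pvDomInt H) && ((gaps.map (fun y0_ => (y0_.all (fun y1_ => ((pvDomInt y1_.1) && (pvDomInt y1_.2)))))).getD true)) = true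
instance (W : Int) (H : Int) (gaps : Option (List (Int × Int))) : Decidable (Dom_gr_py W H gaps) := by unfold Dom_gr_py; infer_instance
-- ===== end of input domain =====

-- B builds the ground row once by an interval-containment test over the gaps and assembles
-- the grid by concatenation, instead of A's mutate-in-place fill-then-carve; objective:
-- alternative (same cost class).

-- ===== PORT A =====
-- Python list assignment `l[c] = v` with a possibly negative index; exact where the
-- index is in range — the only writes reached under Pre_gr_py (out of range Python
-- raises IndexError, which Pre_gr_py excludes).
def pySet1 (l : List Int) (c : Int) (v : Int) : List Int :=
  if 0 ≤ (if c < 0 then c + (l.length : Int) else c)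
  then l.set (if c < 0 then c + (l.length : Int) else c).toNat v else l

-- Python `g[r][c] = v` on a list of rows (same remark on ranges as pySet1).
def pySet2 (g : List (List Int)) (r : Int) (c : Int) (v : Int) : List (List Int) :=
  if 0 ≤ (if r < 0 then r + (g.length : Int) else r)
  then g.modify (if r < 0 then r + (g.length : Int) else r).toNat (fun row => pySet1 row c v) else g

def gr_py (W : Int) (H : Int) (gaps : Option (List (Int × Int))) : List (List Int) :=
  let g := List.replicate H.toNat (List.replicate W.toNat (0 : Int))
  let g := (PySem.List.pyRange 0 W 1).foldl
    (fun g x => pySet2 (pySet2 g (H-1) x 1) (H-2) x 1) g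
  match gaps with
  | some gs =>
      gs.foldl (fun g pr =>
        (PySem.List.pyRange 0 pr.2 1).foldl (fun g dx =>
          if 0 ≤ pr.1 + dx ∧ pr.1 + dx < W then
            pySet2 (pySet2 g (H-1) (pr.1 + dx) 0) (H-2) (pr.1 + dx) 0
          else g) g) g
  | none => g

-- ===== PORT B =====
-- `hole(x)` of Source B: any(gx <= x < gx + gw for gx, gw in (gaps or []))
def holeB (gaps : Option (List (Int × Int))) (x : Int) : Bool :=
  (gaps.getD []).any (fun pr => decide (pr.1 ≤ x ∧ x < pr.1 + pr.2))

def gr_py_alt (W : Int) (H : Int) (gaps : Option (List (Int × Int))) : List (List Int) :=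
  let ground := (PySem.List.pyRange 0 W 1).map (fun x => if holeB gaps x then (0:Int) else 1)
  if H ≤ 0 then []
  else if H = 1 then [ground]
  else List.replicate (H-2).toNat (List.replicate W.toNat (0 : Int)) ++ [ground, ground]

-- ===== PRECONDITION & SPEC =====
-- A raises IndexError exactly when H ≤ 0 and W ≥ 1 (g[H-1] on an empty grid); Pre_ excludes exactly those.
def Pre_gr_py (W : Int) (H : Int) (gaps : Option (List (Int × Int))) : Prop := 1 ≤ H ∨ W ≤ 0
instance (W : Int) (H : Int) (gaps : Option (List (Int × Int))) : Decidable (Pre_gr_py W H gaps) := by unfold Pre_gr_py; infer_instance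

def pvWitness_gr_py : Int × Int × (Option (List (Int × Int))) := (4, 3, some [(1, 2)])

def Spec_gr_py (W : Int) (H : Int) (gaps : Option (List (Int × Int))) (out : List (List Int)) : Prop := out = gr_py_alt W H gaps
instance (W : Int) (H : Int) (gaps : Option (List (Int × Int))) (out : List (List Int)) : Decidable (Spec_gr_py W H gaps out) := by unfold Spec_gr_py; infer_instance

-- ===== CLAIM (what is proved, stated in full; the proofs are below) =====
def Claim_equal_gr_py : Prop := ∀ (W : Int) (H : Int) (gaps : Option (List (Int × Int))), Dom_gr_py W H gaps → Pre_gr_py W H gaps → Spec_gr_py W H gaps (gr_py W H gaps)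

-- ===== LEMMAS AND PROOFS =====

theorem length_pySet1 (l : List Int) (c v : Int) : (pySet1 l c v).length = l.length := by
  unfold pySet1; split <;> split <;> simp

theorem length_pySet2 (g : List (List Int)) (r c v : Int) :
    (pySet2 g r c v).length = g.length := by
  unfold pySet2; split <;> split <;> simp [List.length_modify]

theorem getElem?_pySet2 (g : List (List Int)) (r c v : Int) (i : Nat) :
    (pySet2 g r c v)[i]? =
      if (if r < 0 then r + (g.length : Int) else r) = (i : Int)
      then (g[i]?).map (fun row => pySet1 row c v) else g[i]? := by
  unfold pySet2
  by_cases h0 : 0 ≤ (if r < 0 then r + (g.length : Int) else r)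
  · rw [if_pos h0, List.getElem?_modify]
    by_cases hi : (if r < 0 then r + (g.length : Int) else r) = (i : Int)
    · have h2 : ((if r < 0 then r + (g.length : Int) else r)).toNat = i := by omega
      simp [hi, h2]
    · have h2 : ¬ ((if r < 0 then r + (g.length : Int) else r)).toNat = i := by omega
      simp [hi, h2]
  · rw [if_neg h0, if_neg (by omega)]

theorem getElem?_pySet1_in (row : List Int) (c v : Int) (h0 : 0 ≤ c)
    (h1 : c < (row.length : Int)) (j : Nat) :
    (pySet1 row c v)[j]? = if (j : Int) = c then some v else row[j]? := by
  unfold pySet1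
  rw [if_neg (by omega : ¬ c < 0), if_pos (by omega : (0:Int) ≤ c), List.getElem?_set]
  split_ifs with ha hb hb hc <;> first | rfl | omega

theorem rows_pySet2 (g : List (List Int)) (r c v : Int) (Wn : Nat)
    (hrow : ∀ row ∈ g, row.length = Wn) :
    ∀ row ∈ pySet2 g r c v, row.length = Wn := by
  intro row hmem
  rcases (List.mem_iff_getElem?).1 hmem with ⟨i, hi⟩
  rw [getElem?_pySet2] at hi
  by_cases h : (if r < 0 then r + (g.length : Int) else r) = (i : Int)
  · rw [if_pos h] at hi
    rcases Option.map_eq_some_iff.1 hi with ⟨row0, hrow0, hf⟩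
    rw [← hf, length_pySet1]
    exact hrow row0 (List.mem_iff_getElem?.2 ⟨i, hrow0⟩)
  · rw [if_neg h] at hi
    exact hrow row (List.mem_iff_getElem?.2 ⟨i, hi⟩)

theorem step_cell (H : Int) (hH : 1 ≤ H) (Wn : Nat) (x v : Int)
    (hx0 : 0 ≤ x) (hxW : x < (Wn : Int))
    (g : List (List Int)) (hg : (g.length : Int) = H)
    (hrow : ∀ row ∈ g, row.length = Wn) (i j : Nat) :
    ((pySet2 (pySet2 g (H-1) x v) (H-2) x v)[i]?.bind (fun r => r[j]?))
    = if ((i:Int) = H - 1 ∨ (i:Int) = (if H - 2 < 0 then H - 2 + H else H - 2)) ∧ (j:Int) = x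
      then some v
      else g[i]?.bind (fun r => r[j]?) := by
  have hl1 : ((pySet2 g (H-1) x v).length : Int) = H := by rw [length_pySet2]; exact hg
  rw [getElem?_pySet2, hl1, getElem?_pySet2, hg, if_neg (by omega : ¬ (H - 1 : Int) < 0)]
  by_cases hc1 : (H - 1 : Int) = (i : Int) <;>
    by_cases hc2 : (if H - 2 < 0 then H - 2 + H else H - 2) = (i : Int)
  · -- both rows hit (H = 1)
    have hi : i < g.length := by omega
    have hrowi : g[i]? = some g[i] := List.getElem?_eq_getElem hi
    have hrlen : g[i].length = Wn := hrow _ (List.getElem_mem hi)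
    have hxr : x < (g[i].length : Int) := by rw [hrlen]; exact hxW
    rw [if_pos hc2, if_pos hc1, hrowi]
    simp only [Option.map_some, Option.bind_some]
    rw [getElem?_pySet1_in _ x v hx0 (by rw [length_pySet1]; exact hxr) j,
        getElem?_pySet1_in _ x v hx0 hxr j]
    by_cases hjx : (j : Int) = x
    · rw [if_pos hjx, if_pos ⟨Or.inl hc1.symm, hjx⟩]
    · rw [if_neg hjx, if_neg hjx, if_neg (fun h => hjx h.2)]
  · have hi : i < g.length := by omega
    have hrowi : g[i]? = some g[i] := List.getElem?_eq_getElem hi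
    have hrlen : g[i].length = Wn := hrow _ (List.getElem_mem hi)
    have hxr : x < (g[i].length : Int) := by rw [hrlen]; exact hxW
    rw [if_neg hc2, if_pos hc1, hrowi]
    simp only [Option.map_some, Option.bind_some]
    rw [getElem?_pySet1_in _ x v hx0 hxr j]
    by_cases hjx : (j : Int) = x
    · rw [if_pos hjx, if_pos ⟨Or.inl hc1.symm, hjx⟩]
    · rw [if_neg hjx, if_neg (fun h => hjx h.2)]
  · have hi : i < g.length := by omega
    have hrowi : g[i]? = some g[i] := List.getElem?_eq_getElem hi
    have hrlen : g[i].length = Wn := hrow _ (List.getElem_mem hi)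
    have hxr : x < (g[i].length : Int) := by rw [hrlen]; exact hxW
    rw [if_pos hc2, if_neg hc1, hrowi]
    simp only [Option.map_some, Option.bind_some]
    rw [getElem?_pySet1_in _ x v hx0 hxr j]
    by_cases hjx : (j : Int) = x
    · rw [if_pos hjx, if_pos ⟨Or.inr hc2.symm, hjx⟩]
    · rw [if_neg hjx, if_neg (fun h => hjx h.2)]
  · rw [if_neg hc2, if_neg hc1,
        if_neg (fun h => h.1.elim (fun h1 => hc1 h1.symm) (fun h2 => hc2 h2.symm))]

-- A's first loop: write GROUND on every column of xs.
theorem fill_cell (H : Int) (hH : 1 ≤ H) (Wn : Nat) (v : Int) (xs : List Int)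
    (hx : ∀ x ∈ xs, 0 ≤ x ∧ x < (Wn : Int)) :
    ∀ (g : List (List Int)), (g.length : Int) = H → (∀ row ∈ g, row.length = Wn) →
    ∀ i j : Nat,
    ((xs.foldl (fun g x => pySet2 (pySet2 g (H-1) x v) (H-2) x v) g)[i]?.bind (fun r => r[j]?))
    = if ((i:Int) = H - 1 ∨ (i:Int) = (if H - 2 < 0 then H - 2 + H else H - 2))
        ∧ (∃ x ∈ xs, x = (j:Int))
      then some v
      else g[i]?.bind (fun r => r[j]?) := by
  induction xs with
  | nil => intro g hg hrow i j; simp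
  | cons x xs ih =>
    intro g hg hrow i j
    have hxx := hx x (by simp)
    have hxs : ∀ y ∈ xs, 0 ≤ y ∧ y < (Wn : Int) := fun y hy => hx y (List.mem_cons_of_mem _ hy)
    have hg' : ((pySet2 (pySet2 g (H-1) x v) (H-2) x v).length : Int) = H := by
      rw [length_pySet2, length_pySet2]; exact hg
    have hrow' := rows_pySet2 (pySet2 g (H-1) x v) (H-2) x v Wn (rows_pySet2 g (H-1) x v Wn hrow)
    rw [List.foldl_cons, ih hxs _ hg' hrow' i j,
        step_cell H hH Wn x v hxx.1 hxx.2 g hg hrow i j]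
    by_cases hhit : ((i:Int) = H - 1 ∨ (i:Int) = (if H - 2 < 0 then H - 2 + H else H - 2))
    · by_cases hex : ∃ y ∈ xs, y = (j:Int)
      · rw [if_pos ⟨hhit, hex⟩,
            if_pos ⟨hhit, by rcases hex with ⟨y, hy, hyj⟩; exact ⟨y, by simp [hy], hyj⟩⟩]
      · rw [if_neg (fun h => hex h.2)]
        by_cases hjx : (j:Int) = x
        · rw [if_pos ⟨hhit, hjx⟩, if_pos ⟨hhit, ⟨x, by simp, hjx.symm⟩⟩]
        · rw [if_neg (fun h => hjx h.2),
              if_neg (fun h => by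
                rcases h.2 with ⟨y, hy, hyj⟩
                rcases List.mem_cons.1 hy with rfl | hy'
                · exact hjx hyj.symm
                · exact hex ⟨y, hy', hyj⟩)]
    · rw [if_neg (fun h => hhit h.1), if_neg (fun h => hhit h.1), if_neg (fun h => hhit h.1)]

theorem fill_dims (H : Int) (v : Int) (Wn : Nat) (xs : List Int) :
    ∀ (g : List (List Int)), (∀ row ∈ g, row.length = Wn) →
    ((xs.foldl (fun g x => pySet2 (pySet2 g (H-1) x v) (H-2) x v) g).length = g.length
      ∧ ∀ row ∈ xs.foldl (fun g x => pySet2 (pySet2 g (H-1) x v) (H-2) x v) g, row.length = Wn) := by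
  intro g hrow
  induction xs generalizing g with
  | nil => exact ⟨rfl, hrow⟩
  | cons x xs ih =>
    obtain ⟨h1, h2⟩ := ih (pySet2 (pySet2 g (H-1) x v) (H-2) x v)
      (rows_pySet2 (pySet2 g (H-1) x v) (H-2) x v Wn (rows_pySet2 g (H-1) x v Wn hrow))
    refine ⟨?_, by simpa using h2⟩
    rw [List.foldl_cons, h1, length_pySet2, length_pySet2]

-- one gap of A's carve loop
theorem gap_cell (W H : Int) (hH : 1 ≤ H) (a : Int) :
    ∀ (l : List Int) (g : List (List Int)),
    (g.length : Int) = H → (∀ row ∈ g, row.length = W.toNat) →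
    ∀ i j : Nat,
    ((l.foldl (fun g dx =>
        if 0 ≤ a + dx ∧ a + dx < W then
          pySet2 (pySet2 g (H-1) (a + dx) 0) (H-2) (a + dx) 0
        else g) g)[i]?.bind (fun r => r[j]?))
    = if ((i:Int) = H - 1 ∨ (i:Int) = (if H - 2 < 0 then H - 2 + H else H - 2))
        ∧ (∃ dx ∈ l, (0 ≤ a + dx ∧ a + dx < W) ∧ a + dx = (j:Int))
      then some 0
      else g[i]?.bind (fun r => r[j]?) := by
  intro l
  induction l with
  | nil => intro g hg hrow i j; simp
  | cons d l ih =>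
    intro g hg hrow i j
    rw [List.foldl_cons]
    by_cases hp : 0 ≤ a + d ∧ a + d < W
    · have hg' : ((pySet2 (pySet2 g (H-1) (a+d) 0) (H-2) (a+d) 0).length : Int) = H := by
        rw [length_pySet2, length_pySet2]; exact hg
      have hrow' := rows_pySet2 (pySet2 g (H-1) (a+d) 0) (H-2) (a+d) 0 W.toNat
        (rows_pySet2 g (H-1) (a+d) 0 W.toNat hrow)
      rw [if_pos hp, ih _ hg' hrow' i j,
          step_cell H hH W.toNat (a+d) 0 hp.1 (by omega) g hg hrow i j]
      by_cases hhit : ((i:Int) = H - 1 ∨ (i:Int) = (if H - 2 < 0 then H - 2 + H else H - 2))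
      · by_cases hex : ∃ dx ∈ l, (0 ≤ a + dx ∧ a + dx < W) ∧ a + dx = (j:Int)
        · rw [if_pos ⟨hhit, hex⟩,
              if_pos ⟨hhit, by rcases hex with ⟨y, hy, h1, h2⟩; exact ⟨y, by simp [hy], h1, h2⟩⟩]
        · rw [if_neg (fun h => hex h.2)]
          by_cases hjx : (j:Int) = a + d
          · rw [if_pos ⟨hhit, hjx⟩, if_pos ⟨hhit, ⟨d, by simp, hp, hjx.symm⟩⟩]
          · rw [if_neg (fun h => hjx h.2),
                if_neg (fun h => by
                  rcases h.2 with ⟨y, hy, h1, h2⟩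
                  rcases List.mem_cons.1 hy with rfl | hy'
                  · exact hjx h2.symm
                  · exact hex ⟨y, hy', h1, h2⟩)]
      · rw [if_neg (fun h => hhit h.1), if_neg (fun h => hhit h.1), if_neg (fun h => hhit h.1)]
    · rw [if_neg hp, ih _ hg hrow i j]
      by_cases hhit : ((i:Int) = H - 1 ∨ (i:Int) = (if H - 2 < 0 then H - 2 + H else H - 2))
      · by_cases hex : ∃ dx ∈ l, (0 ≤ a + dx ∧ a + dx < W) ∧ a + dx = (j:Int)
        · rw [if_pos ⟨hhit, hex⟩,
              if_pos ⟨hhit, by rcases hex with ⟨y, hy, h1, h2⟩; exact ⟨y, by simp [hy], h1, h2⟩⟩]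
        · rw [if_neg (fun h => hex h.2),
              if_neg (fun h => by
                rcases h.2 with ⟨y, hy, h1, h2⟩
                rcases List.mem_cons.1 hy with rfl | hy'
                · exact hp h1
                · exact hex ⟨y, hy', h1, h2⟩)]
      · rw [if_neg (fun h => hhit h.1), if_neg (fun h => hhit h.1)]

theorem gap_dims (W H : Int) (a : Int) (l : List Int) :
    ∀ (g : List (List Int)), (∀ row ∈ g, row.length = W.toNat) →
    ((l.foldl (fun g dx =>
        if 0 ≤ a + dx ∧ a + dx < W then
          pySet2 (pySet2 g (H-1) (a + dx) 0) (H-2) (a + dx) 0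
        else g) g).length = g.length
      ∧ ∀ row ∈ l.foldl (fun g dx =>
        if 0 ≤ a + dx ∧ a + dx < W then
          pySet2 (pySet2 g (H-1) (a + dx) 0) (H-2) (a + dx) 0
        else g) g, row.length = W.toNat) := by
  induction l with
  | nil => intro g hrow; exact ⟨rfl, hrow⟩
  | cons d l ih =>
    intro g hrow
    rw [List.foldl_cons]
    by_cases hp : 0 ≤ a + d ∧ a + d < W
    · rw [if_pos hp]
      obtain ⟨h1, h2⟩ := ih (pySet2 (pySet2 g (H-1) (a+d) 0) (H-2) (a+d) 0)
        (rows_pySet2 (pySet2 g (H-1) (a+d) 0) (H-2) (a+d) 0 W.toNat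
          (rows_pySet2 g (H-1) (a+d) 0 W.toNat hrow))
      exact ⟨by rw [h1, length_pySet2, length_pySet2], h2⟩
    · rw [if_neg hp]; exact ih g hrow

-- A's gap loops: carve AIR on every clamped gap column.
theorem carve_cell (W H : Int) (hH : 1 ≤ H) (hW : 0 < W) :
    ∀ (gs : List (Int × Int)) (g : List (List Int)),
    (g.length : Int) = H → (∀ row ∈ g, row.length = W.toNat) →
    ∀ i j : Nat,
    ((gs.foldl (fun g pr =>
        (PySem.List.pyRange 0 pr.2 1).foldl (fun g dx =>
          if 0 ≤ pr.1 + dx ∧ pr.1 + dx < W then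
            pySet2 (pySet2 g (H-1) (pr.1 + dx) 0) (H-2) (pr.1 + dx) 0
          else g) g) g)[i]?.bind (fun r => r[j]?))
    = if ((i:Int) = H - 1 ∨ (i:Int) = (if H - 2 < 0 then H - 2 + H else H - 2))
        ∧ (j:Int) < W ∧ (∃ pr ∈ gs, pr.1 ≤ (j:Int) ∧ (j:Int) < pr.1 + pr.2)
      then some 0
      else g[i]?.bind (fun r => r[j]?) := by
  intro gs
  induction gs with
  | nil => intro g hg hrow i j; simp
  | cons pr gs ih =>
    intro g hg hrow i j
    rw [List.foldl_cons]
    obtain ⟨hd1, hd2⟩ := gap_dims W H pr.1 (PySem.List.pyRange 0 pr.2 1) g hrow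
    have hg' : (((PySem.List.pyRange 0 pr.2 1).foldl (fun g dx =>
        if 0 ≤ pr.1 + dx ∧ pr.1 + dx < W then
          pySet2 (pySet2 g (H-1) (pr.1 + dx) 0) (H-2) (pr.1 + dx) 0
        else g) g).length : Int) = H := by rw [hd1]; exact hg
    rw [ih _ hg' hd2 i j, gap_cell W H hH pr.1 (PySem.List.pyRange 0 pr.2 1) g hg hrow i j]
    have hiff : (∃ dx ∈ PySem.List.pyRange 0 pr.2 1,
        (0 ≤ pr.1 + dx ∧ pr.1 + dx < W) ∧ pr.1 + dx = (j:Int))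
        ↔ ((j:Int) < W ∧ pr.1 ≤ (j:Int) ∧ (j:Int) < pr.1 + pr.2) := by
      constructor
      · rintro ⟨dx, hdx, ⟨h0, h1⟩, h2⟩
        rw [PySem.List.mem_pyRange_one] at hdx
        omega
      · rintro ⟨h0, h1, h2⟩
        exact ⟨(j:Int) - pr.1, PySem.List.mem_pyRange_one.2 (by omega), by omega, by omega⟩
    by_cases hhit : ((i:Int) = H - 1 ∨ (i:Int) = (if H - 2 < 0 then H - 2 + H else H - 2))
    · by_cases hex : (j:Int) < W ∧ ∃ p2 ∈ gs, p2.1 ≤ (j:Int) ∧ (j:Int) < p2.1 + p2.2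
      · rw [if_pos ⟨hhit, hex⟩,
            if_pos ⟨hhit, hex.1, by rcases hex.2 with ⟨y, hy, hyj⟩; exact ⟨y, by simp [hy], hyj⟩⟩]
      · rw [if_neg (fun h => hex ⟨h.2.1, h.2.2⟩)]
        by_cases hgap : (∃ dx ∈ PySem.List.pyRange 0 pr.2 1,
            (0 ≤ pr.1 + dx ∧ pr.1 + dx < W) ∧ pr.1 + dx = (j:Int))
        · have := hiff.1 hgap
          rw [if_pos ⟨hhit, hgap⟩, if_pos ⟨hhit, this.1, ⟨pr, by simp, this.2⟩⟩]
        · rw [if_neg (fun h => hgap h.2),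
              if_neg (fun h => by
                rcases h.2.2 with ⟨y, hy, hyj⟩
                rcases List.mem_cons.1 hy with rfl | hy'
                · exact hgap (hiff.2 ⟨h.2.1, hyj⟩)
                · exact hex ⟨h.2.1, y, hy', hyj⟩)]
    · rw [if_neg (fun h => hhit h.1), if_neg (fun h => hhit h.1), if_neg (fun h => hhit h.1)]

theorem carve_dims (W H : Int) (gs : List (Int × Int)) :
    ∀ (g : List (List Int)), (∀ row ∈ g, row.length = W.toNat) →
    ((gs.foldl (fun g pr =>
        (PySem.List.pyRange 0 pr.2 1).foldl (fun g dx =>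
          if 0 ≤ pr.1 + dx ∧ pr.1 + dx < W then
            pySet2 (pySet2 g (H-1) (pr.1 + dx) 0) (H-2) (pr.1 + dx) 0
          else g) g) g).length = g.length
      ∧ ∀ row ∈ gs.foldl (fun g pr =>
        (PySem.List.pyRange 0 pr.2 1).foldl (fun g dx =>
          if 0 ≤ pr.1 + dx ∧ pr.1 + dx < W then
            pySet2 (pySet2 g (H-1) (pr.1 + dx) 0) (H-2) (pr.1 + dx) 0
          else g) g) g, row.length = W.toNat) := by
  induction gs with
  | nil => intro g hrow; exact ⟨rfl, hrow⟩
  | cons pr gs ih =>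
    intro g hrow
    rw [List.foldl_cons]
    obtain ⟨hd1, hd2⟩ := gap_dims W H pr.1 (PySem.List.pyRange 0 pr.2 1) g hrow
    obtain ⟨h1, h2⟩ := ih _ hd2
    exact ⟨by rw [h1, hd1], h2⟩

theorem ext_cells (A B : List (List Int)) (Hn Wn : Nat)
    (hA : A.length = Hn) (hB : B.length = Hn)
    (hAr : ∀ row ∈ A, row.length = Wn) (hBr : ∀ row ∈ B, row.length = Wn)
    (hcell : ∀ i j : Nat, i < Hn → j < Wn →
      (A[i]?.bind (fun r => r[j]?)) = (B[i]?.bind (fun r => r[j]?))) : A = B := by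
  apply List.ext_getElem?
  intro i
  by_cases hi : i < Hn
  · have hiA : i < A.length := by omega
    have hiB : i < B.length := by omega
    rw [List.getElem?_eq_getElem hiA, List.getElem?_eq_getElem hiB]
    congr 1
    apply List.ext_getElem?
    intro j
    have hlA : A[i].length = Wn := hAr _ (List.getElem_mem hiA)
    have hlB : B[i].length = Wn := hBr _ (List.getElem_mem hiB)
    by_cases hj : j < Wn
    · have := hcell i j hi hj
      rw [List.getElem?_eq_getElem hiA, List.getElem?_eq_getElem hiB] at this
      simpa using this
    · rw [List.getElem?_eq_none (by omega), List.getElem?_eq_none (by omega)]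
  · rw [List.getElem?_eq_none (by omega), List.getElem?_eq_none (by omega)]

-- with W ≤ 0 the carve loops never write
theorem carve_id (W H : Int) (hW : W ≤ 0) (gs : List (Int × Int)) (g : List (List Int)) :
    (gs.foldl (fun g pr =>
        (PySem.List.pyRange 0 pr.2 1).foldl (fun g dx =>
          if 0 ≤ pr.1 + dx ∧ pr.1 + dx < W then
            pySet2 (pySet2 g (H-1) (pr.1 + dx) 0) (H-2) (pr.1 + dx) 0
          else g) g) g) = g := by
  induction gs generalizing g with
  | nil => rfl
  | cons pr gs ih =>
    rw [List.foldl_cons]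
    have hin : ∀ (l : List Int) (g : List (List Int)),
        (l.foldl (fun g dx =>
          if 0 ≤ pr.1 + dx ∧ pr.1 + dx < W then
            pySet2 (pySet2 g (H-1) (pr.1 + dx) 0) (H-2) (pr.1 + dx) 0
          else g) g) = g := by
      intro l; induction l with
      | nil => intro g; rfl
      | cons d l ihl => intro g; rw [List.foldl_cons, if_neg (by omega)]; exact ihl g
    rw [hin]; exact ih g

-- B's ground row, indexed.
theorem ground_getElem? (W : Int) (hW : 0 < W) (gaps : Option (List (Int × Int))) (j : Nat)
    (hj : j < W.toNat) :
    ((PySem.List.pyRange 0 W 1).map (fun x => if holeB gaps x then (0:Int) else 1))[j]?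
      = some (if holeB gaps (j:Int) then (0:Int) else 1) := by
  have hjl : j < ((PySem.List.pyRange 0 W 1).map
      (fun x => if holeB gaps x then (0:Int) else 1)).length := by
    rw [List.length_map, PySem.List.length_pyRange_one]; omega
  rw [List.getElem?_eq_getElem hjl, List.getElem_map, PySem.List.getElem_pyRange_one]
  simp

theorem ground_length (W : Int) (gaps : Option (List (Int × Int))) :
    ((PySem.List.pyRange 0 W 1).map (fun x => if holeB gaps x then (0:Int) else 1)).length
      = W.toNat := by
  rw [List.length_map, PySem.List.length_pyRange_one]; omega

theorem alt_dims (W H : Int) (hH : 1 ≤ H) (gaps : Option (List (Int × Int))) :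
    (gr_py_alt W H gaps).length = H.toNat
      ∧ ∀ row ∈ gr_py_alt W H gaps, row.length = W.toNat := by
  unfold gr_py_alt
  rw [if_neg (by omega : ¬ H ≤ 0)]
  by_cases h1 : H = 1
  · rw [if_pos h1]
    constructor
    · simp [h1]
    · intro row hr
      simp only [List.mem_singleton] at hr
      rw [hr, ground_length]
  · rw [if_neg h1]
    constructor
    · rw [List.length_append, List.length_replicate]; simp; omega
    · intro row hr
      rcases List.mem_append.1 hr with hr | hr
      · rw [List.eq_of_mem_replicate hr]; simp
      · simp only [List.mem_cons, List.not_mem_nil, or_false] at hr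
        rcases hr with rfl | rfl
        · rw [ground_length]
        · rw [ground_length]

-- B's cell values (1 ≤ H, 0 < W, i < H, j < W).
theorem alt_cell (W H : Int) (hH : 1 ≤ H) (hW : 0 < W) (gaps : Option (List (Int × Int)))
    (i j : Nat) (hi : i < H.toNat) (hj : j < W.toNat) :
    ((gr_py_alt W H gaps)[i]?.bind (fun r => r[j]?))
    = if ((i:Int) = H - 1 ∨ (i:Int) = (if H - 2 < 0 then H - 2 + H else H - 2))
      then some (if holeB gaps (j:Int) then (0:Int) else 1)
      else some 0 := by
  unfold gr_py_alt
  rw [if_neg (by omega : ¬ H ≤ 0)]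
  by_cases h1 : H = 1
  · rw [if_pos h1]
    have hi0 : i = 0 := by omega
    subst hi0
    have : ([(PySem.List.pyRange 0 W 1).map (fun x => if holeB gaps x then (0:Int) else 1)][0]?)
        = some ((PySem.List.pyRange 0 W 1).map (fun x => if holeB gaps x then (0:Int) else 1)) := rfl
    rw [this, Option.bind_some, ground_getElem? W hW gaps j hj,
        if_pos (Or.inl (by omega))]
  · rw [if_neg h1]
    have hH2 : 2 ≤ H := by omega
    by_cases hlt : i < (H-2).toNat
    · rw [List.getElem?_append_left (by simp; omega), List.getElem?_replicate, if_pos hlt,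
          Option.bind_some, List.getElem?_replicate, if_pos hj,
          if_neg (fun hcon => by
            rw [if_neg (by omega : ¬ (H - 2 : Int) < 0)] at hcon; omega)]
    · have hge : (List.replicate (H-2).toNat (List.replicate W.toNat (0:Int))).length ≤ i := by
        simp; omega
      rw [List.getElem?_append_right hge]
      have hidx : i - (List.replicate (H-2).toNat (List.replicate W.toNat (0:Int))).length = i - (H-2).toNat := by simp
      rw [hidx]
      have hcase : i - (H-2).toNat = 0 ∨ i - (H-2).toNat = 1 := by omega
      have hhit : ((i:Int) = H - 1 ∨ (i:Int) = (if H - 2 < 0 then H - 2 + H else H - 2)) := by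
        rw [if_neg (by omega : ¬ (H - 2 : Int) < 0)]; omega
      rcases hcase with hc | hc <;>
        rw [hc] <;>
        simp only [List.getElem?_cons_zero, List.getElem?_cons_succ, Option.bind_some] <;>
        rw [ground_getElem? W hW gaps j hj, if_pos hhit]

-- B's hole test agrees with A's carve condition for an in-range column.
theorem holeB_iff (W : Int) (gs : List (Int × Int)) (j : Int) (h0 : 0 ≤ j) (h1 : j < W) :
    holeB (some gs) j = true ↔ (j < W ∧ ∃ pr ∈ gs, pr.1 ≤ j ∧ j < pr.1 + pr.2) := by
  unfold holeB
  simp only [Option.getD_some, List.any_eq_true, decide_eq_true_eq]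
  constructor
  · rintro ⟨pr, hpr, hc⟩; exact ⟨h1, pr, hpr, hc⟩
  · rintro ⟨_, pr, hpr, hc⟩; exact ⟨pr, hpr, hc⟩

-- replicate of empty rows splits off its last two rows
theorem replicate_split (n : Nat) (hn : 2 ≤ n) (x : List Int) :
    List.replicate n x = List.replicate (n-2) x ++ [x, x] := by
  have : n = (n-2) + 2 := by omega
  rw [this, List.replicate_add]
  simp

-- ===== VERDICT (by name: the statement is the Claim_ definition above) =====
theorem gr_py_spec : Claim_equal_gr_py := by
  intro W H gaps hDom hPre
  unfold Spec_gr_py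
  by_cases hW : W ≤ 0
  · -- empty width: every row is []
    have h0 : PySem.List.pyRange 0 W 1 = [] := PySem.List.pyRange_one_eq_nil (by omega)
    have hW0 : W.toNat = 0 := by omega
    have hground : ((PySem.List.pyRange 0 W 1).map
        (fun x => if holeB gaps x then (0:Int) else 1)) = [] := by rw [h0]; rfl
    have hA : gr_py W H gaps = List.replicate H.toNat ([] : List Int) := by
      cases gaps with
      | none => simp only [gr_py, h0, List.foldl_nil, hW0, List.replicate_zero]
      | some gs =>
        simp only [gr_py, h0, List.foldl_nil, hW0, List.replicate_zero]
        exact carve_id W H hW gs _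
    rw [hA]
    unfold gr_py_alt
    by_cases hH0 : H ≤ 0
    · rw [if_pos hH0]
      have : H.toNat = 0 := by omega
      rw [this]; rfl
    · rw [if_neg hH0]
      by_cases h1 : H = 1
      · rw [if_pos h1, hground, h1]; rfl
      · rw [if_neg h1, hground, hW0]
        simp only [List.replicate_zero]
        have h2 : (H-2).toNat = H.toNat - 2 := by omega
        rw [h2]
        exact replicate_split H.toNat (by omega) []
  · have hH : 1 ≤ H := hPre.resolve_right hW
    have hWpos : 0 < W := by omega
    have hg0len : (List.replicate H.toNat (List.replicate W.toNat (0:Int))).length = H.toNat := by simp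
    have hg0lenI : ((List.replicate H.toNat (List.replicate W.toNat (0:Int))).length : Int) = H := by
      simp; omega
    have hg0row : ∀ row ∈ List.replicate H.toNat (List.replicate W.toNat (0:Int)),
        row.length = W.toNat := by
      intro row hr; rw [List.eq_of_mem_replicate hr]; simp
    have hxr : ∀ x ∈ PySem.List.pyRange 0 W 1, 0 ≤ x ∧ x < (W.toNat : Int) := by
      intro x hx; rw [PySem.List.mem_pyRange_one] at hx; omega
    have hcell0 : ∀ i j : Nat, i < H.toNat → j < W.toNat →
        ((List.replicate H.toNat (List.replicate W.toNat (0:Int)))[i]?.bind (fun r => r[j]?))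
          = some (0:Int) := by
      intro i j hi hj
      rw [List.getElem?_replicate, if_pos hi]
      simp [List.getElem?_replicate, hj]
    obtain ⟨haltl, haltr⟩ := alt_dims W H hH gaps
    have hexr : ∀ j : Nat, j < W.toNat → ∃ x ∈ PySem.List.pyRange 0 W 1, x = (j:Int) := by
      intro j hj
      exact ⟨(j:Int), PySem.List.mem_pyRange_one.2 (by omega), rfl⟩
    cases gaps with
    | none =>
      simp only [gr_py]
      obtain ⟨hfl, hfr⟩ := fill_dims H 1 W.toNat (PySem.List.pyRange 0 W 1)
        (List.replicate H.toNat (List.replicate W.toNat (0:Int))) hg0row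
      apply ext_cells _ _ H.toNat W.toNat (by rw [hfl, hg0len]) haltl hfr haltr
      intro i j hi hj
      rw [fill_cell H hH W.toNat 1 (PySem.List.pyRange 0 W 1) hxr _ hg0lenI hg0row i j,
          alt_cell W H hH hWpos none i j hi hj, hcell0 i j hi hj]
      have hhole : holeB none (j:Int) = false := rfl
      rw [hhole]
      by_cases hhit : ((i:Int) = H - 1 ∨ (i:Int) = (if H - 2 < 0 then H - 2 + H else H - 2))
      · rw [if_pos ⟨hhit, hexr j hj⟩, if_pos hhit]; rfl
      · rw [if_neg (fun h => hhit h.1), if_neg hhit]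
    | some gs =>
      simp only [gr_py]
      obtain ⟨hfl, hfr⟩ := fill_dims H 1 W.toNat (PySem.List.pyRange 0 W 1)
        (List.replicate H.toNat (List.replicate W.toNat (0:Int))) hg0row
      obtain ⟨hcl, hcr⟩ := carve_dims W H gs
        ((PySem.List.pyRange 0 W 1).foldl (fun g x => pySet2 (pySet2 g (H-1) x 1) (H-2) x 1)
          (List.replicate H.toNat (List.replicate W.toNat (0:Int)))) hfr
      apply ext_cells _ _ H.toNat W.toNat (by rw [hcl, hfl, hg0len]) haltl hcr haltr
      intro i j hi hj
      have hfillI : (((PySem.List.pyRange 0 W 1).foldl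
          (fun g x => pySet2 (pySet2 g (H-1) x 1) (H-2) x 1)
          (List.replicate H.toNat (List.replicate W.toNat (0:Int)))).length : Int) = H := by
        rw [hfl]; exact hg0lenI
      rw [carve_cell W H hH hWpos gs _ hfillI hfr i j,
          fill_cell H hH W.toNat 1 (PySem.List.pyRange 0 W 1) hxr _ hg0lenI hg0row i j,
          alt_cell W H hH hWpos (some gs) i j hi hj, hcell0 i j hi hj]
      have hjW : (j:Int) < W := by omega
      by_cases hhit : ((i:Int) = H - 1 ∨ (i:Int) = (if H - 2 < 0 then H - 2 + H else H - 2))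
      · by_cases hhole : holeB (some gs) (j:Int) = true
        · have hc := (holeB_iff W gs (j:Int) (by omega) hjW).1 hhole
          rw [if_pos ⟨hhit, hc⟩, if_pos hhit, hhole]; rfl
        · have hc : ¬ ((j:Int) < W ∧ ∃ pr ∈ gs, pr.1 ≤ (j:Int) ∧ (j:Int) < pr.1 + pr.2) :=
            fun h => hhole ((holeB_iff W gs (j:Int) (by omega) hjW).2 h)
          have hb : holeB (some gs) (j:Int) = false := by
            revert hhole; cases holeB (some gs) (j:Int) <;> simp
          rw [if_neg (fun h => hc h.2), if_pos ⟨hhit, hexr j hj⟩, if_pos hhit, hb]; rfl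
      · rw [if_neg (fun h => hhit h.1), if_neg (fun h => hhit h.1), if_neg hhit]
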